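-- pv_equiv track=rewrite | github.com/limnyn/python_codingtest | 프로그래머스/169199_리코쳇.py | solution
-- ===== SOURCE A (Python) =====
-- from collections import deque
--
-- INF = float("inf")
--
-- def solution(board):
--     # 입력단
--     MAX_ROW, MAX_COL = len(board), len(board[0])
--
--     count_board = [[INF] * MAX_COL for _ in range(MAX_ROW)]
--
--     for i in range(MAX_ROW):
--         for j in range(MAX_COL):
--             if board[i][j] == "R":
--                 start_r, start_c = i, j
--             elif board[i][j] == "G":
--                 end_r, end_c = i, j
--
--     dq = deque([[start_r, start_c, 1]])
--
--     dir = [(1, 0), (0, 1), (-1, 0), (0, -1)]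
--
--     while dq:
--         if count_board[end_r][end_c] != INF:
--             return count_board[end_r][end_c]
--
--         curr_r, curr_c, count = dq.popleft()
--         for dr, dc in dir:
--             post_r, post_c = curr_r, curr_c
--
--             while (
--                 0 <= post_r + dr < MAX_ROW
--                 and 0 <= post_c + dc < MAX_COL
--                 and board[post_r + dr][post_c + dc] != "D"
--             ):
--                 post_r = post_r + dr
--                 post_c = post_c + dc
--
--             if count < count_board[post_r][post_c]:
--                 count_board[post_r][post_c] = count
--                 dq.append([post_r, post_c, count + 1])
--
--     return -1
-- ===== SOURCE B (Python) =====
-- def solution(board):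
--     n, m = len(board), len(board[0])
--
--     pos = {}
--     for i in range(n):
--         for j in range(m):
--             ch = board[i][j]
--             if ch == "R" or ch == "G":
--                 pos[ch] = (i, j)
--     start, goal = pos["R"], pos["G"]
--
--     def dests(r, c):
--         out = []
--         for dr, dc in ((1, 0), (0, 1), (-1, 0), (0, -1)):
--             rr, cc = r, c
--             while 0 <= rr + dr < n and 0 <= cc + dc < m and board[rr + dr][cc + dc] != "D":
--                 rr += dr
--                 cc += dc
--             out.append((rr, cc))
--         return out
--
--     # Bellman-Ford-style fixpoint: sweep the whole discovered-distance map,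
--     # adding slide destinations at d+1, until nothing changes or the goal appears.
--     dist = {start: 0}
--     changed = True
--     while changed and goal not in dist:
--         changed = False
--         for cell, d in list(dist.items()):
--             for nb in dests(*cell):
--                 if nb not in dist:
--                     dist[nb] = d + 1
--                     changed = True
--     return dist[goal] if goal in dist else -1
-- ===== Notes on version B (the rewrite author's own statement) =====
-- stated objective: alternative
-- what changed: B replaces A's deque BFS with early exit over a float('inf') distance matrix by a Bellman-Ford-style fixpoint: it keeps a dictionary of discovered distances and repeatedly sweeps the whole dictionary, adding each slide destination at d+1, until nothing changes or the goal is discovered.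
import Mathlib
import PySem

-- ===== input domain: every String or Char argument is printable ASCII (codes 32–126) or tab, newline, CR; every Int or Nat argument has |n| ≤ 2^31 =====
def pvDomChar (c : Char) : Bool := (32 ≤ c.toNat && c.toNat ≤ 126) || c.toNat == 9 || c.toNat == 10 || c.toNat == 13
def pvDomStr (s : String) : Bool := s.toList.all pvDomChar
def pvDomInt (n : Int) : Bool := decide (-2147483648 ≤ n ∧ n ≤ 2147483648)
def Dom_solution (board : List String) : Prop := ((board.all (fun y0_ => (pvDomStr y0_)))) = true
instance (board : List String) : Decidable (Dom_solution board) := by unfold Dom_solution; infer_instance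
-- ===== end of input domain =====

-- B replaces A's deque BFS over a distance matrix by a Bellman-Ford-style fixpoint sweep of a
-- distance dictionary (objective: alternative; no speed claim; return value only).

-- ===== PORT A =====
-- board[i][j] as a Char; out-of-range default ' ' is never read under Pre_solution
def pvCellA (board : List String) (i j : Int) : Char :=
  PySem.List.pyGetD (PySem.List.pyGetD board i "").toList j ' '

def pvDirsA : List (Int × Int) := [(1, 0), (0, 1), (-1, 0), (0, -1)]

-- float('inf') appears only as the initial value of count_board entries and is used only in
-- 'x != INF' and 'count < x'; it is modeled exactly by (none : Option Int).

-- A's inner while loop (slide until wall/'D'/border); fuel n+m+2 strictly bounds its steps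
def pvSlideA (board : List String) (n m dr dc : Int) : Nat → Int → Int → Int × Int
  | 0, r, c => (r, c)
  | fuel + 1, r, c =>
    if 0 ≤ r + dr ∧ r + dr < n ∧ 0 ≤ c + dc ∧ c + dc < m ∧ pvCellA board (r + dr) (c + dc) ≠ 'D'
    then pvSlideA board n m dr dc fuel (r + dr) (c + dc)
    else (r, c)

-- A's scan for R and G (last occurrence overwrites, like the Python variables)
def pvFindA (board : List String) (n m : Int) : Option (Int × Int) × Option (Int × Int) :=
  (PySem.List.pyRange 0 n 1).foldl (fun s i =>
    (PySem.List.pyRange 0 m 1).foldl (fun s j =>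
      if pvCellA board i j = 'R' then (some (i, j), s.2)
      else if pvCellA board i j = 'G' then (s.1, some (i, j))
      else s) s) (none, none)

def pvGetCell (cb : List (List (Option Int))) (r c : Int) : Option Int :=
  PySem.List.pyGetD (PySem.List.pyGetD cb r []) c none

def pvSetCell (cb : List (List (Option Int))) (r c : Int) (v : Int) : List (List (Option Int)) :=
  PySem.List.pySetD cb r (PySem.List.pySetD (PySem.List.pyGetD cb r []) c (some v))

-- A's while-dq loop; the fuel passed below strictly bounds the number of iterations
-- (each append is paired with a fresh cell getting a finite count)
def pvLoopA (board : List String) (n m er ec : Int) :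
    Nat → List (List (Option Int)) → List (Int × Int × Int) → Int
  | 0, _, _ => -1
  | _ + 1, _, [] => -1
  | fuel + 1, cb, (r, c, cnt) :: rest =>
    match pvGetCell cb er ec with
    | some v => v
    | none =>
      let st := pvDirsA.foldl
        (fun (st : List (List (Option Int)) × List (Int × Int × Int)) dd =>
          let p := pvSlideA board n m dd.1 dd.2 (n.toNat + m.toNat + 2) r c
          match pvGetCell st.1 p.1 p.2 with
          | some v =>
            if cnt < v then (pvSetCell st.1 p.1 p.2 cnt, st.2 ++ [(p.1, p.2, cnt + 1)]) else st
          | none => (pvSetCell st.1 p.1 p.2 cnt, st.2 ++ [(p.1, p.2, cnt + 1)])) (cb, rest)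
      pvLoopA board n m er ec fuel st.1 st.2

def solution (board : List String) : Int :=
  let n : Int := PySem.List.len board
  let m : Int := PySem.Str.len (PySem.List.pyGetD board 0 "")
  match pvFindA board n m with
  | (some s, some e) =>
    pvLoopA board n m e.1 e.2 ((n.toNat + 1) * (m.toNat + 1) + 2)
      (List.replicate n.toNat (List.replicate m.toNat (none : Option Int))) [(s.1, s.2, 1)]
  | _ => 0   -- Python raises NameError here (no R or no G); excluded by Pre_solution

-- ===== PORT B =====
-- board[i][j] as a Char (B's own copy of the cell accessor)
def pvCellB (board : List String) (i j : Int) : Char :=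
  PySem.List.pyGetD (PySem.List.pyGetD board i "").toList j ' '

def pvDirsB : List (Int × Int) := [(1, 0), (0, 1), (-1, 0), (0, -1)]

-- B's R/G-location dictionary 'pos'
def pvFindB (board : List String) (n m : Int) : PySem.Dict Char (Int × Int) :=
  (PySem.List.pyRange 0 n 1).foldl (fun d i =>
    (PySem.List.pyRange 0 m 1).foldl (fun d j =>
      let ch := pvCellB board i j
      if ch = 'R' ∨ ch = 'G' then d.insert ch (i, j) else d) d) PySem.Dict.empty

-- the slide loop inside B's dests helper (fuel n+m+2 strictly bounds its steps)
def pvDestB (board : List String) (n m dr dc : Int) : Nat → Int → Int → Int × Int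
  | 0, r, c => (r, c)
  | fuel + 1, r, c =>
    if 0 ≤ r + dr ∧ r + dr < n ∧ 0 ≤ c + dc ∧ c + dc < m ∧ pvCellB board (r + dr) (c + dc) ≠ 'D'
    then pvDestB board n m dr dc fuel (r + dr) (c + dc)
    else (r, c)

-- B's dests(r, c): the four slide landing cells
def pvDestsB (board : List String) (n m r c : Int) : List (Int × Int) :=
  pvDirsB.map (fun dd => pvDestB board n m dd.1 dd.2 (n.toNat + m.toNat + 2) r c)

-- one sweep of B's 'for cell, d in list(dist.items())' over the snapshot; state = (dist, changed)
def pvRoundB (board : List String) (n m : Int)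
    (items : List ((Int × Int) × Int)) (st0 : PySem.Dict (Int × Int) Int × Bool) :
    PySem.Dict (Int × Int) Int × Bool :=
  items.foldl (fun st p =>
    (pvDestsB board n m p.1.1 p.1.2).foldl (fun st nb =>
      match st.1.get? nb with
      | none => (st.1.insert nb (p.2 + 1), true)
      | some _ => st) st) st0

-- B's 'while changed and goal not in dist' fixpoint loop; fuel n*m+2 bounds the rounds
-- (dist grows strictly on every round that sets changed)
def pvLoopB (board : List String) (n m : Int) (goal : Int × Int) :
    Nat → Bool → PySem.Dict (Int × Int) Int → Int
  | 0, _, _ => -1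
  | fuel + 1, changed, dist =>
    if changed = true ∧ dist.get? goal = none then
      let st := pvRoundB board n m dist.items (dist, false)
      pvLoopB board n m goal fuel st.2 st.1
    else
      match dist.get? goal with
      | some v => v
      | none => -1

def solution_alt (board : List String) : Int :=
  let n : Int := PySem.List.len board
  let m : Int := PySem.Str.len (PySem.List.pyGetD board 0 "")
  let pos := pvFindB board n m
  match pos.get? 'R' with
  | none => 0   -- Python raises KeyError here; excluded by Pre_solution
  | some s =>
    match pos.get? 'G' with
    | none => 0   -- Python raises KeyError here; excluded by Pre_solution
    | some g =>
      pvLoopB board n m g (n.toNat * m.toNat + 2) true (PySem.Dict.empty.insert s 0)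

-- ===== PRECONDITION & SPEC =====
-- Pre_solution is exactly where the Python A returns: a nonempty board whose rows all reach the
-- width of row 0, with an 'R' and a 'G' somewhere in the scanned rectangle (else IndexError/NameError).
def Pre_solution (board : List String) : Prop :=
  board ≠ [] ∧
  (∀ s ∈ board, (board.headD "").toList.length ≤ s.toList.length) ∧
  (∃ s ∈ board, 'R' ∈ s.toList.take (board.headD "").toList.length) ∧
  (∃ s ∈ board, 'G' ∈ s.toList.take (board.headD "").toList.length)
instance (board : List String) : Decidable (Pre_solution board) := by
  unfold Pre_solution; infer_instance

def pvWitness_solution : List String := (["RG"])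

def Spec_solution (board : List String) (out : Int) : Prop := out = solution_alt board
instance (board : List String) (out : Int) : Decidable (Spec_solution board out) := by
  unfold Spec_solution; infer_instance

-- ===== CLAIM (what is proved, stated in full; the proofs are below) =====
def Claim_equal_solution : Prop :=
  ∀ (board : List String), Dom_solution board → Pre_solution board →
    Spec_solution board (solution board)

-- ===== LEMMAS AND PROOFS =====

-- ---------- the slide graph and its BFS levels (common specification layer) ----------

def pvGrid (n m : Int) : Finset (Int × Int) :=
  ((Finset.range n.toNat) ×ˢ (Finset.range m.toNat)).image (fun p => ((p.1 : Int), (p.2 : Int)))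

theorem pvMem_grid (n m : Int) (v : Int × Int) :
    v ∈ pvGrid n m ↔ 0 ≤ v.1 ∧ v.1 < n ∧ 0 ≤ v.2 ∧ v.2 < m := by
  unfold pvGrid
  simp only [Finset.mem_image, Finset.mem_product, Finset.mem_range]
  constructor
  · rintro ⟨p, ⟨h1, h2⟩, rfl⟩
    simp; omega
  · rintro ⟨h0, h1, h2, h3⟩
    refine ⟨(v.1.toNat, v.2.toNat), ⟨by omega, by omega⟩, ?_⟩
    have h5 : (v.1.toNat : Int) = v.1 := by omega
    have h4 : (v.2.toNat : Int) = v.2 := by omega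
    simp [h5, h4]

-- the four slide destinations of a cell (the out-neighbours in the ricochet graph)
def pvNbr (board : List String) (n m : Int) (v : Int × Int) : List (Int × Int) :=
  pvDirsA.map (fun dd => pvSlideA board n m dd.1 dd.2 (n.toNat + m.toNat + 2) v.1 v.2)

-- cells reachable from s in at most k moves
def pvV (board : List String) (n m : Int) (s : Int × Int) : Nat → Finset (Int × Int)
  | 0 => {s}
  | k + 1 =>
    pvV board n m s k ∪
      (pvV board n m s k).biUnion (fun v => (pvNbr board n m v).toFinset)

def pvIsDist (board : List String) (n m : Int) (s v : Int × Int) (k : Nat) : Prop :=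
  v ∈ pvV board n m s k ∧ ∀ j < k, v ∉ pvV board n m s j

-- what both loops are proved to return: the distance to g if g is reachable, else -1
def pvResOK (board : List String) (n m : Int) (s g : Int × Int) (res : Int) : Prop :=
  (∀ k, pvIsDist board n m s g k → res = (k : Int)) ∧
  ((∀ k, g ∉ pvV board n m s k) → res = -1)

-- ---------- generic facts about the level sets ----------

theorem pvV_subset_succ (board : List String) (n m : Int) (s : Int × Int) (k : Nat) :
    pvV board n m s k ⊆ pvV board n m s (k + 1) := by
  intro v hv
  show v ∈ pvV board n m s k ∪ _
  exact Finset.mem_union_left _ hv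

theorem pvV_mono (board : List String) (n m : Int) (s : Int × Int) {j k : Nat} (h : j ≤ k) :
    pvV board n m s j ⊆ pvV board n m s k := by
  induction k with
  | zero => simpa [Nat.le_zero.mp h]
  | succ k ih =>
    rcases Nat.lt_or_ge j (k + 1) with hlt | hge
    · exact (ih (Nat.lt_succ_iff.mp hlt)).trans (pvV_subset_succ board n m s k)
    · have : j = k + 1 := le_antisymm h hge
      subst this; exact Finset.Subset.refl _

theorem pvMem_V_succ (board : List String) (n m : Int) (s : Int × Int) (k : Nat) (v : Int × Int) :
    v ∈ pvV board n m s (k + 1) ↔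
      v ∈ pvV board n m s k ∨ ∃ u ∈ pvV board n m s k, v ∈ pvNbr board n m u := by
  show v ∈ pvV board n m s k ∪ (pvV board n m s k).biUnion _ ↔ _
  simp [Finset.mem_union, Finset.mem_biUnion, List.mem_toFinset]

theorem pvV_stable_step (board : List String) (n m : Int) (s : Int × Int) (r : Nat)
    (h : pvV board n m s (r + 1) = pvV board n m s r) :
    pvV board n m s (r + 2) = pvV board n m s (r + 1) := by
  have : pvV board n m s (r + 2) =
      pvV board n m s (r + 1) ∪
        (pvV board n m s (r + 1)).biUnion (fun v => (pvNbr board n m v).toFinset) := rfl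
  rw [this, h]
  exact h

theorem pvV_stable (board : List String) (n m : Int) (s : Int × Int) (r : Nat)
    (h : pvV board n m s (r + 1) = pvV board n m s r) :
    ∀ k, pvV board n m s k ⊆ pvV board n m s r := by
  have hall : ∀ i, pvV board n m s (r + i) = pvV board n m s r := by
    intro i
    induction i with
    | zero => rfl
    | succ i ih =>
      have h1 : r + (i + 1) = (r + i) + 1 := by omega
      rw [h1]
      show pvV board n m s (r + i) ∪
        (pvV board n m s (r + i)).biUnion (fun v => (pvNbr board n m v).toFinset) = _
      rw [ih]
      exact h
  intro k
  rcases Nat.le_total k r with hk | hk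
  · exact pvV_mono board n m s hk
  · have := hall (k - r)
    have hrk : r + (k - r) = k := by omega
    rw [hrk] at this
    rw [this]

theorem pvIsDist_exists (board : List String) (n m : Int) (s v : Int × Int) (k : Nat)
    (h : v ∈ pvV board n m s k) : ∃ j, j ≤ k ∧ pvIsDist board n m s v j := by
  induction k with
  | zero => exact ⟨0, le_refl _, h, by omega⟩
  | succ k ih =>
    by_cases hk : v ∈ pvV board n m s k
    · obtain ⟨j, hj, hd⟩ := ih hk
      exact ⟨j, by omega, hd⟩
    · refine ⟨k + 1, le_refl _, h, ?_⟩
      intro j hj hmem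
      exact hk (pvV_mono board n m s (by omega : j ≤ k) hmem)

theorem pvIsDist_unique (board : List String) (n m : Int) (s v : Int × Int) {j k : Nat}
    (hj : pvIsDist board n m s v j) (hk : pvIsDist board n m s v k) : j = k := by
  by_contra hne
  rcases Nat.lt_or_ge j k with h | h
  · exact hk.2 j h hj.1
  · exact hj.2 k (by omega) hk.1

theorem pvIsDist_le (board : List String) (n m : Int) (s v : Int × Int) {k j : Nat}
    (hd : pvIsDist board n m s v k) (hm : v ∈ pvV board n m s j) : k ≤ j := by
  by_contra h
  exact hd.2 j (by omega) hm

theorem pvResOK_unique (board : List String) (n m : Int) (s g : Int × Int) (r1 r2 : Int)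
    (h1 : pvResOK board n m s g r1) (h2 : pvResOK board n m s g r2) : r1 = r2 := by
  by_cases hex : ∃ k, g ∈ pvV board n m s k
  · obtain ⟨k, hk⟩ := hex
    obtain ⟨j, _, hj⟩ := pvIsDist_exists board n m s g k hk
    rw [h1.1 j hj, h2.1 j hj]
  · push_neg at hex
    rw [h1.2 hex, h2.2 hex]

theorem pvSlideA_inR (board : List String) (n m dr dc : Int) :
    ∀ (fuel : Nat) (r c : Int), 0 ≤ r → r < n → 0 ≤ c → c < m →
      (pvSlideA board n m dr dc fuel r c) ∈ pvGrid n m := by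
  intro fuel
  induction fuel with
  | zero => intro r c h0 h1 h2 h3; exact (pvMem_grid n m _).mpr ⟨h0, h1, h2, h3⟩
  | succ f ih =>
    intro r c h0 h1 h2 h3
    simp only [pvSlideA]
    split_ifs with h
    · exact ih _ _ h.1 h.2.1 h.2.2.1 h.2.2.2.1
    · exact (pvMem_grid n m _).mpr ⟨h0, h1, h2, h3⟩

theorem pvNbr_subset_grid (board : List String) (n m : Int) (v : Int × Int)
    (hv : v ∈ pvGrid n m) : ∀ w ∈ pvNbr board n m v, w ∈ pvGrid n m := by
  intro w hw
  obtain ⟨dd, _, hdd⟩ := List.mem_map.mp hw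
  rw [← hdd]
  obtain ⟨h0, h1, h2, h3⟩ := (pvMem_grid n m v).mp hv
  exact pvSlideA_inR board n m dd.1 dd.2 _ v.1 v.2 h0 h1 h2 h3

theorem pvV_subset_grid (board : List String) (n m : Int) (s : Int × Int)
    (hs : s ∈ pvGrid n m) : ∀ k, pvV board n m s k ⊆ pvGrid n m := by
  intro k
  induction k with
  | zero => intro v hv; simp only [pvV, Finset.mem_singleton] at hv; rwa [hv]
  | succ k ih =>
    intro v hv
    rcases (pvMem_V_succ board n m s k v).mp hv with h | ⟨u, hu, hnb⟩
    · exact ih h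
    · exact pvNbr_subset_grid board n m u (ih hu) v hnb

theorem pvCard_grid (n m : Int) : (pvGrid n m).card = n.toNat * m.toNat := by
  unfold pvGrid
  rw [Finset.card_image_of_injective _ (fun a b h => by
    simp only [Prod.mk.injEq] at h
    exact Prod.ext (by exact_mod_cast h.1) (by exact_mod_cast h.2))]
  simp [Finset.card_product]

theorem pvCard_V_le (board : List String) (n m : Int) (s : Int × Int)
    (hs : s ∈ pvGrid n m) (k : Nat) : (pvV board n m s k).card ≤ n.toNat * m.toNat := by
  rw [← pvCard_grid n m]
  exact Finset.card_le_card (pvV_subset_grid board n m s hs k)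

-- ---------- count_board as a matrix: access lemmas ----------

def pvWF (n m : Int) (cb : List (List (Option Int))) : Prop :=
  cb.length = n.toNat ∧ ∀ row ∈ cb, row.length = m.toNat

theorem pvWF_init (n m : Int) :
    pvWF n m (List.replicate n.toNat (List.replicate m.toNat (none : Option Int))) := by
  refine ⟨List.length_replicate, ?_⟩
  intro row hr
  rw [List.eq_of_mem_replicate hr]
  exact List.length_replicate

theorem pvGetCell_init (n m r c : Int) (h : (r, c) ∈ pvGrid n m) :
    pvGetCell (List.replicate n.toNat (List.replicate m.toNat (none : Option Int))) r c
      = none := by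
  obtain ⟨h0, h1, h2, h3⟩ := (pvMem_grid n m (r, c)).mp h
  unfold pvGetCell
  rw [PySem.List.pyGetD_eq_getElem _ _ h0 (by simp [List.length_replicate]; omega)]
  rw [List.getElem_replicate]
  rw [PySem.List.pyGetD_eq_getElem _ _ h2 (by simp [List.length_replicate]; omega)]
  rw [List.getElem_replicate]

theorem pvWF_setCell (n m : Int) (cb : List (List (Option Int))) (hwf : pvWF n m cb)
    (pr pc v : Int) (hp : (pr, pc) ∈ pvGrid n m) :
    pvWF n m (pvSetCell cb pr pc v) := by
  obtain ⟨p0, p1, p2, p3⟩ := (pvMem_grid n m (pr, pc)).mp hp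
  obtain ⟨hl, hrow⟩ := hwf
  have hrowmem : PySem.List.pyGetD cb pr [] ∈ cb := by
    rw [PySem.List.pyGetD_eq_getElem _ _ p0 (by omega)]
    exact List.getElem_mem _
  unfold pvSetCell
  rw [PySem.List.pySetD_of_nonneg _ _ p0, PySem.List.pySetD_of_nonneg _ _ p2]
  refine ⟨by simp [hl], ?_⟩
  intro row' hr'
  rcases List.mem_or_eq_of_mem_set hr' with hmem | heq
  · exact hrow _ hmem
  · rw [heq, List.length_set]
    exact hrow _ hrowmem

theorem pvGetCell_setCell (n m : Int) (cb : List (List (Option Int))) (hwf : pvWF n m cb)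
    (pr pc v r c : Int) (hp : (pr, pc) ∈ pvGrid n m) (hq : (r, c) ∈ pvGrid n m) :
    pvGetCell (pvSetCell cb pr pc v) r c
      = if (r, c) = (pr, pc) then some v else pvGetCell cb r c := by
  obtain ⟨p0, p1, p2, p3⟩ := (pvMem_grid n m (pr, pc)).mp hp
  obtain ⟨h0, h1, h2, h3⟩ := (pvMem_grid n m (r, c)).mp hq
  obtain ⟨hl, hrow⟩ := hwf
  have hrowmem : PySem.List.pyGetD cb pr [] ∈ cb := by
    rw [PySem.List.pyGetD_eq_getElem _ _ p0 (by omega)]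
    exact List.getElem_mem _
  have hrlen : (PySem.List.pyGetD cb pr []).length = m.toNat := hrow _ hrowmem
  unfold pvSetCell pvGetCell
  rw [PySem.List.pySetD_of_nonneg _ _ p0, PySem.List.pySetD_of_nonneg _ _ p2]
  rw [PySem.List.pyGetD_eq_getElem _ _ h0 (by simp [List.length_set]; omega)]
  rw [List.getElem_set]
  by_cases hre : r = pr
  · rw [if_pos (by omega : pr.toNat = r.toNat)]
    rw [PySem.List.pyGetD_eq_getElem _ _ h2 (by simp [List.length_set]; omega)]
    rw [List.getElem_set]
    by_cases hce : c = pc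
    · rw [if_pos (by omega : pc.toNat = c.toNat),
        if_pos (by simp [hre, hce] : ((r, c) : Int × Int) = (pr, pc))]
    · rw [if_neg (by omega : ¬ pc.toNat = c.toNat),
        if_neg (by simp [hce] : ¬ ((r, c) : Int × Int) = (pr, pc))]
      rw [hre]
      rw [PySem.List.pyGetD_eq_getElem _ _ h2 (by omega)]
  · rw [if_neg (by omega : ¬ pr.toNat = r.toNat),
      if_neg (by simp [hre] : ¬ ((r, c) : Int × Int) = (pr, pc))]
    have hx := PySem.List.pyGetD_eq_getElem cb ([] : List (Option Int)) h0 (by omega : r < (cb.length : Int))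
    rw [hx]

-- the unset in-range cells (the fuel measure of A's loop decreases with |queue| + this card)
def pvUnset (n m : Int) (cb : List (List (Option Int))) : Finset (Int × Int) :=
  (pvGrid n m).filter (fun v => pvGetCell cb v.1 v.2 = none)

theorem pvUnset_card_le (n m : Int) (cb : List (List (Option Int))) :
    (pvUnset n m cb).card ≤ n.toNat * m.toNat := by
  rw [← pvCard_grid n m]
  exact Finset.card_le_card (Finset.filter_subset _ _)

theorem pvUnset_set (n m : Int) (cb : List (List (Option Int))) (hwf : pvWF n m cb)
    (p : Int × Int) (v : Int) (hp : p ∈ pvGrid n m) (hnone : pvGetCell cb p.1 p.2 = none) :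
    (pvUnset n m (pvSetCell cb p.1 p.2 v)).card + 1 = (pvUnset n m cb).card := by
  have hset : pvUnset n m (pvSetCell cb p.1 p.2 v) = (pvUnset n m cb).erase p := by
    ext w
    simp only [pvUnset, Finset.mem_erase, Finset.mem_filter]
    constructor
    · rintro ⟨hw, hwn⟩
      rw [pvGetCell_setCell n m cb hwf p.1 p.2 v w.1 w.2 (by simpa using hp) (by simpa using hw)]
        at hwn
      by_cases hwp : (w.1, w.2) = (p.1, p.2)
      · rw [if_pos hwp] at hwn; cases hwn
      · rw [if_neg hwp] at hwn
        exact ⟨fun hc => hwp (by rw [hc]), hw, hwn⟩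
    · rintro ⟨hne, hw, hwn⟩
      refine ⟨hw, ?_⟩
      rw [pvGetCell_setCell n m cb hwf p.1 p.2 v w.1 w.2 (by simpa using hp) (by simpa using hw)]
      rw [if_neg (by intro hc; apply hne; ext <;> simp_all)]
      exact hwn
  rw [hset, Finset.card_erase_of_mem (by simp [pvUnset, Finset.mem_filter]; exact ⟨hp, hnone⟩)]
  have : 0 < (pvUnset n m cb).card :=
    Finset.card_pos.mpr ⟨p, by simp [pvUnset, Finset.mem_filter]; exact ⟨hp, hnone⟩⟩
  omega

-- ===================================================================
-- A-side: the queue BFS returns the distance to g (or -1)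
-- ===================================================================

structure pvInvA (board : List String) (n m : Int) (s g : Int × Int) (d : Nat)
    (cb : List (List (Option Int))) (q : List (Int × Int × Int)) : Prop where
  wf : pvWF n m cb
  split : ∃ q1 q2, q = q1 ++ q2 ∧ (∀ e ∈ q1, e.2.2 = (d : Int)) ∧
            (∀ e ∈ q2, e.2.2 = (d : Int) + 1)
  qmem : ∀ e ∈ q, ((e.1, e.2.1) ∈ pvGrid n m) ∧
            (((e.1, e.2.1) = s ∧ e.2.2 = 1) ∨ pvGetCell cb e.1 e.2.1 = some (e.2.2 - 1))
  vals : ∀ v ∈ pvGrid n m, v ≠ s → ∀ c : Int, pvGetCell cb v.1 v.2 = some c →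
            ∃ k, pvIsDist board n m s v k ∧ c = (k : Int)
  bounds : ∀ v ∈ pvGrid n m, ∀ c : Int, pvGetCell cb v.1 v.2 = some c → 1 ≤ c ∧ c ≤ (d : Int)
  levelset : ∀ v ∈ pvV board n m s (d - 1), v = s ∨ pvGetCell cb v.1 v.2 ≠ none
  expand : ∀ v ∈ pvGrid n m, (v = s ∨ pvGetCell cb v.1 v.2 ≠ none) →
            (∃ e ∈ q, (e.1, e.2.1) = v) ∨
            (∀ w ∈ pvNbr board n m v, pvGetCell cb w.1 w.2 ≠ none)
  sInit : (∃ e ∈ q, (e.1, e.2.1) = s ∧ e.2.2 = 1) ∨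
            (∀ w ∈ pvNbr board n m s, pvGetCell cb w.1 w.2 ≠ none)
  goalq : q = [] → pvGetCell cb g.1 g.2 = none
  dpos : 1 ≤ d

-- the expansion step of A's direction loop (definitionally the foldl body inside pvLoopA)
def pvStepA (board : List String) (n m r0 c0 cnt : Int)
    (st : List (List (Option Int)) × List (Int × Int × Int)) (dd : Int × Int) :
    List (List (Option Int)) × List (Int × Int × Int) :=
  let p := pvSlideA board n m dd.1 dd.2 (n.toNat + m.toNat + 2) r0 c0
  match pvGetCell st.1 p.1 p.2 with
  | some v =>
    if cnt < v then (pvSetCell st.1 p.1 p.2 cnt, st.2 ++ [(p.1, p.2, cnt + 1)]) else st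
  | none => (pvSetCell st.1 p.1 p.2 cnt, st.2 ++ [(p.1, p.2, cnt + 1)])

-- state of count_board during an expansion, relative to its value cb at the pop
def pvFInv (board : List String) (n m : Int) (s : Int × Int) (d : Nat)
    (cb cb' : List (List (Option Int))) : Prop :=
  pvWF n m cb' ∧
  (∀ w ∈ pvGrid n m, pvGetCell cb w.1 w.2 ≠ none →
    pvGetCell cb' w.1 w.2 = pvGetCell cb w.1 w.2) ∧
  (∀ w ∈ pvGrid n m, pvGetCell cb' w.1 w.2 ≠ none →
    pvGetCell cb w.1 w.2 ≠ none ∨ pvGetCell cb' w.1 w.2 = some (d : Int)) ∧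
  (∀ v ∈ pvGrid n m, v ≠ s → ∀ c : Int, pvGetCell cb' v.1 v.2 = some c →
    ∃ k, pvIsDist board n m s v k ∧ c = (k : Int)) ∧
  (∀ v ∈ pvGrid n m, ∀ c : Int, pvGetCell cb' v.1 v.2 = some c → 1 ≤ c ∧ c ≤ (d : Int))

theorem pvFoldA (board : List String) (n m : Int) (s : Int × Int) (d : Nat)
    (cb : List (List (Option Int))) (r0 c0 cnt : Int)
    (hv0 : ((r0, c0) : Int × Int) ∈ pvGrid n m) (hcnt : cnt = (d : Int)) (hd : 1 ≤ d)
    (Hnew : ∀ w ∈ pvNbr board n m (r0, c0), pvGetCell cb w.1 w.2 = none → w ≠ s →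
      pvIsDist board n m s w d) :
    ∀ (ds : List (Int × Int)) (st : List (List (Option Int)) × List (Int × Int × Int)),
      (∀ dd ∈ ds, pvSlideA board n m dd.1 dd.2 (n.toNat + m.toNat + 2) r0 c0
        ∈ pvNbr board n m (r0, c0)) →
      pvFInv board n m s d cb st.1 →
      pvFInv board n m s d cb (ds.foldl (pvStepA board n m r0 c0 cnt) st).1 ∧
      (∀ w ∈ pvGrid n m, pvGetCell st.1 w.1 w.2 ≠ none →
        pvGetCell (ds.foldl (pvStepA board n m r0 c0 cnt) st).1 w.1 w.2
          = pvGetCell st.1 w.1 w.2) ∧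
      (∀ dd ∈ ds,
        pvGetCell (ds.foldl (pvStepA board n m r0 c0 cnt) st).1
          (pvSlideA board n m dd.1 dd.2 (n.toNat + m.toNat + 2) r0 c0).1
          (pvSlideA board n m dd.1 dd.2 (n.toNat + m.toNat + 2) r0 c0).2 ≠ none) ∧
      ∃ P, (ds.foldl (pvStepA board n m r0 c0 cnt) st).2 = st.2 ++ P ∧
        (∀ e ∈ P, (e.1, e.2.1) ∈ pvGrid n m ∧ (e.1, e.2.1) ∈ pvNbr board n m (r0, c0) ∧
          e.2.2 = cnt + 1 ∧
          pvGetCell (ds.foldl (pvStepA board n m r0 c0 cnt) st).1 e.1 e.2.1 = some cnt) ∧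
        (∀ w ∈ pvGrid n m, pvGetCell st.1 w.1 w.2 = none →
          pvGetCell (ds.foldl (pvStepA board n m r0 c0 cnt) st).1 w.1 w.2 ≠ none →
          ∃ e ∈ P, ((e.1, e.2.1) : Int × Int) = w) ∧
        (pvUnset n m (ds.foldl (pvStepA board n m r0 c0 cnt) st).1).card + P.length
          = (pvUnset n m st.1).card := by
  intro ds
  induction ds with
  | nil =>
    intro st _ hF
    exact ⟨hF, fun w _ _ => rfl, by simp, [], by simp, by simp, by simp, by simp⟩
  | cons dd ds ih =>
    intro st hmem hF
    obtain ⟨hwf, hpres, hnewv, hvals, hbounds⟩ := hF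
    set p := pvSlideA board n m dd.1 dd.2 (n.toNat + m.toNat + 2) r0 c0 with hpdef
    have hpnbr : p ∈ pvNbr board n m (r0, c0) := hmem dd List.mem_cons_self
    have hpgrid : p ∈ pvGrid n m := pvNbr_subset_grid board n m (r0, c0) hv0 p hpnbr
    have hstep : pvStepA board n m r0 c0 cnt st dd
        = match pvGetCell st.1 p.1 p.2 with
          | some v =>
            if cnt < v then (pvSetCell st.1 p.1 p.2 cnt, st.2 ++ [(p.1, p.2, cnt + 1)]) else st
          | none => (pvSetCell st.1 p.1 p.2 cnt, st.2 ++ [(p.1, p.2, cnt + 1)]) := rfl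
    simp only [List.foldl_cons]
    cases hget : pvGetCell st.1 p.1 p.2 with
    | some v =>
      -- already-set destination: cnt < v is impossible, the state is unchanged
      have hvle : v ≤ (d : Int) := (hbounds p hpgrid v hget).2
      have hnotlt : ¬ cnt < v := by rw [hcnt]; omega
      have hstep' : pvStepA board n m r0 c0 cnt st dd = st := by
        rw [hstep]
        simp only [hget, if_neg hnotlt]
      rw [hstep']
      have := ih st (fun x hx => hmem x (List.mem_cons_of_mem _ hx))
        ⟨hwf, hpres, hnewv, hvals, hbounds⟩
      obtain ⟨hF', hpres', hcov', P, hP⟩ := this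
      refine ⟨hF', hpres', ?_, P, hP⟩
      intro x hx
      rcases List.mem_cons.mp hx with rfl | hx'
      · rw [hpres' p hpgrid (by rw [hget]; simp), hget]
        simp
      · exact hcov' x hx'
    | none =>
      -- fresh destination: set it to cnt and push it with cnt + 1
      have hcbnone : pvGetCell cb p.1 p.2 = none := by
        by_contra hne
        rw [hpres p hpgrid hne] at hget
        exact hne hget
      have hstep' : pvStepA board n m r0 c0 cnt st dd
          = (pvSetCell st.1 p.1 p.2 cnt, st.2 ++ [(p.1, p.2, cnt + 1)]) := by
        rw [hstep]
        simp only [hget]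
      have hwf2 := pvWF_setCell n m st.1 hwf p.1 p.2 cnt (by simpa using hpgrid)
      have hgs2 : ∀ w : Int × Int, w ∈ pvGrid n m →
          pvGetCell (pvSetCell st.1 p.1 p.2 cnt) w.1 w.2
            = if w = p then some cnt else pvGetCell st.1 w.1 w.2 := by
        intro w hw
        rw [pvGetCell_setCell n m st.1 hwf p.1 p.2 cnt w.1 w.2 (by simpa using hpgrid)
          (by simpa using hw)]
      have hF2 : pvFInv board n m s d cb (pvSetCell st.1 p.1 p.2 cnt) := by
        refine ⟨hwf2, ?_, ?_, ?_, ?_⟩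
        · intro w hw hwn
          rw [hgs2 w hw]
          rw [if_neg (by
            intro hwp
            rw [hwp] at hwn
            exact hwn hcbnone)]
          exact hpres w hw hwn
        · intro w hw hwn
          rw [hgs2 w hw] at hwn ⊢
          by_cases hwp : w = p
          · rw [if_pos hwp]
            right; rw [hcnt]
          · rw [if_neg hwp] at hwn ⊢
            exact hnewv w hw hwn
        · intro w hw hws c hc
          rw [hgs2 w hw] at hc
          by_cases hwp : w = p
          · rw [if_pos hwp] at hc
            have hc' : c = cnt := by injection hc with h; exact h.symm
            have hdist : pvIsDist board n m s w d :=
              Hnew w (by rw [hwp]; exact hpnbr) (by rw [hwp]; exact hcbnone) hws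
            exact ⟨d, hdist, by rw [hc', hcnt]⟩
          · rw [if_neg hwp] at hc
            exact hvals w hw hws c hc
        · intro w hw c hc
          rw [hgs2 w hw] at hc
          by_cases hwp : w = p
          · rw [if_pos hwp] at hc
            have hc' : c = cnt := by injection hc with h; exact h.symm
            rw [hc', hcnt]
            constructor
            · exact_mod_cast hd
            · exact le_refl _
          · rw [if_neg hwp] at hc
            exact hbounds w hw c hc
      have := ih (pvSetCell st.1 p.1 p.2 cnt, st.2 ++ [(p.1, p.2, cnt + 1)])
        (fun x hx => hmem x (List.mem_cons_of_mem _ hx)) hF2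
      obtain ⟨hF', hpres', hcov', P, hPq, hPe, hPnew, hPcard⟩ := this
      rw [hstep']
      have hsetp : pvGetCell (pvSetCell st.1 p.1 p.2 cnt) p.1 p.2 = some cnt := by
        rw [hgs2 p hpgrid, if_pos rfl]
      refine ⟨hF', ?_, ?_, (p.1, p.2, cnt + 1) :: P, ?_, ?_, ?_, ?_⟩
      · -- values already set before this step are preserved
        intro w hw hwn
        have hwp : w ≠ p := by
          intro hc
          rw [hc] at hwn
          exact hwn hget
        rw [hpres' w hw (by rw [hgs2 w hw, if_neg hwp]; exact hwn)]
        rw [hgs2 w hw, if_neg hwp]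
      · intro x hx
        rcases List.mem_cons.mp hx with rfl | hx'
        · rw [← hpdef, hpres' p hpgrid (by rw [hsetp]; simp), hsetp]
          simp
        · exact hcov' x hx'
      · rw [hPq]; simp
      · intro e he
        rcases List.mem_cons.mp he with rfl | he'
        · refine ⟨by simpa using hpgrid, by simpa using hpnbr, rfl, ?_⟩
          show pvGetCell _ p.1 p.2 = some cnt
          rw [hpres' p hpgrid (by rw [hsetp]; simp)]
          exact hsetp
        · exact hPe e he'
      · intro w hw hw0 hwn
        by_cases hwp : w = p
        · exact ⟨(p.1, p.2, cnt + 1), List.mem_cons_self, by rw [hwp]⟩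
        · have : pvGetCell (pvSetCell st.1 p.1 p.2 cnt) w.1 w.2 = none := by
            rw [hgs2 w hw, if_neg hwp]
            exact hw0
          obtain ⟨e, he, hee⟩ := hPnew w hw this hwn
          exact ⟨e, List.mem_cons_of_mem _ he, hee⟩
      · have hcd := pvUnset_set n m st.1 hwf p cnt hpgrid hget
        dsimp only at hPcard
        simp only [List.length_cons]
        omega

-- normalize the level so that the popped head carries count d
theorem pvInvA_norm (board : List String) (n m : Int) (s g : Int × Int) (d : Nat)
    (cb : List (List (Option Int))) (e : Int × Int × Int) (rest : List (Int × Int × Int))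
    (hs : s ∈ pvGrid n m)
    (hInv : pvInvA board n m s g d cb (e :: rest)) :
    ∃ d', 1 ≤ d' ∧ pvInvA board n m s g d' cb (e :: rest) ∧ e.2.2 = (d' : Int) ∧
      ∃ q1 q2, rest = q1 ++ q2 ∧ (∀ x ∈ q1, x.2.2 = (d' : Int)) ∧
        (∀ x ∈ q2, x.2.2 = (d' : Int) + 1) := by
  obtain ⟨q1, q2, hq, h1, h2⟩ := hInv.split
  cases q1 with
  | cons x q1' =>
    rw [List.cons_append] at hq
    injection hq with he hr
    refine ⟨d, hInv.dpos, hInv, ?_, q1', q2, hr, ?_, h2⟩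
    · rw [he]; exact h1 x List.mem_cons_self
    · intro y hy; exact h1 y (List.mem_cons_of_mem _ hy)
  | nil =>
    -- the whole queue is at count d + 1: shift the level
    simp only [List.nil_append] at hq
    have hall : ∀ x ∈ e :: rest, x.2.2 = (d : Int) + 1 := by
      rw [hq]; exact h2
    have hnos1 : ∀ x ∈ e :: rest, ¬ ((x.1, x.2.1) = s ∧ x.2.2 = 1) := by
      intro x hx h
      have h2 := hall x hx
      rw [h.2] at h2
      have h3 := hInv.dpos
      omega
    have hlevel : ∀ v ∈ pvV board n m s d, v = s ∨ pvGetCell cb v.1 v.2 ≠ none := by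
      have hdd : d = (d - 1) + 1 := by have := hInv.dpos; omega
      intro v hv
      rw [hdd] at hv
      rcases (pvMem_V_succ board n m s (d - 1) v).mp hv with hvd | ⟨u, hu, hnb⟩
      · exact hInv.levelset v hvd
      · rcases hInv.levelset u hu with hus | huset
        · -- u = s: the initial entry is gone, so s is fully expanded
          rcases hInv.sInit with ⟨x, hx, hxs, hx1⟩ | hexp
          · exact absurd ⟨hxs, hx1⟩ (hnos1 x hx)
          · right
            rw [hus] at hnb
            exact hexp v hnb
        · -- u is a settled interior vertex no longer in the queue
          have hugrid : u ∈ pvGrid n m := pvV_subset_grid board n m s hs (d - 1) hu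
          by_cases hus : u = s
          · rcases hInv.sInit with ⟨x, hx, hxs, hx1⟩ | hexp
            · exact absurd ⟨hxs, hx1⟩ (hnos1 x hx)
            · right
              rw [hus] at hnb
              exact hexp v hnb
          · cases hcu : pvGetCell cb u.1 u.2 with
            | none => exact absurd hcu huset
            | some cu =>
              obtain ⟨k, hk, hck⟩ := hInv.vals u hugrid hus cu hcu
              have hkd : k ≤ d - 1 := pvIsDist_le board n m s u hk hu
              rcases hInv.expand u hugrid (Or.inr huset) with ⟨x, hx, hxu⟩ | hexp
              · -- impossible: its queue entry would carry count d + 1, i.e. value d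
                rcases (hInv.qmem x hx).2 with ⟨hxs, hx1⟩ | hxval
                · exact absurd ⟨hxs, hx1⟩ (hnos1 x hx)
                · have hxval' : pvGetCell cb u.1 u.2 = some (x.2.2 - 1) := by
                    rw [← hxu]; exact hxval
                  rw [hcu] at hxval'
                  have hcux : cu = x.2.2 - 1 := by injection hxval' with hh; try exact hh
                  have hxc := hall x hx
                  have hdp := hInv.dpos
                  omega
              · right
                exact hexp v hnb
    refine ⟨d + 1, by omega, ?_, by rw [hall e List.mem_cons_self]; push_cast; try ring, ?_⟩
    · refine ⟨hInv.wf, ⟨e :: rest, [], by simp, ?_, by simp⟩, hInv.qmem, hInv.vals, ?_, ?_,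
        hInv.expand, hInv.sInit, ?_, by omega⟩
      · intro x hx
        rw [hall x hx]
        push_cast
        try ring
      · intro v hv c hc
        obtain ⟨h1c, h2c⟩ := hInv.bounds v hv c hc
        constructor
        · exact h1c
        · push_cast; omega
      · simpa using hlevel
      · intro h; cases h
    · refine ⟨rest, [], by simp, ?_, by simp⟩
      intro x hx
      rw [hall x (List.mem_cons_of_mem _ hx)]
      push_cast
      try ring

theorem pvLoopA_ok (board : List String) (n m : Int) (s g : Int × Int)
    (hs : s ∈ pvGrid n m) (hg : g ∈ pvGrid n m) (hgs : g ≠ s) :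
    ∀ (fuel : Nat) (d : Nat) (cb : List (List (Option Int))) (q : List (Int × Int × Int)),
      pvInvA board n m s g d cb q →
      q.length + (pvUnset n m cb).card + 1 ≤ fuel →
      pvResOK board n m s g (pvLoopA board n m g.1 g.2 fuel cb q) := by
  intro fuel
  induction fuel with
  | zero => intro d cb q _ hfuel; omega
  | succ f ih =>
    intro d cb q hInv hfuel
    cases q with
    | nil =>
      -- empty queue: everything reachable is expanded, so g is unreachable
      have hclosed : ∀ k, ∀ v ∈ pvV board n m s k, v = s ∨ pvGetCell cb v.1 v.2 ≠ none := by
        intro k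
        induction k with
        | zero =>
          intro v hv
          left
          simpa [pvV] using hv
        | succ k ihk =>
          intro v hv
          rcases (pvMem_V_succ board n m s k v).mp hv with hvk | ⟨u, hu, hnb⟩
          · exact ihk v hvk
          · have hugrid : u ∈ pvGrid n m := pvV_subset_grid board n m s hs k hu
            have huset : u = s ∨ pvGetCell cb u.1 u.2 ≠ none := ihk u hu
            rcases hInv.expand u hugrid huset with ⟨x, hx, _⟩ | hexp
            · cases hx
            · right
              exact hexp v hnb
      constructor
      · intro k hk
        rcases hclosed k g hk.1 with h | h
        · exact absurd h hgs
        · exact absurd (hInv.goalq rfl) h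
      · intro _
        rfl
    | cons e rest =>
      obtain ⟨d', hd', hInv', hecnt, q1, q2, hrest, hq1, hq2⟩ :=
        pvInvA_norm board n m s g d cb e rest hs hInv
      clear hInv
      obtain ⟨r0, c0, cnt⟩ := e
      show pvResOK board n m s g (pvLoopA board n m g.1 g.2 (f + 1) cb ((r0, c0, cnt) :: rest))
      rw [pvLoopA]
      cases hgoal : pvGetCell cb g.1 g.2 with
      | some v =>
        obtain ⟨k, hk, hvk⟩ := hInv'.vals g hg hgs v hgoal
        constructor
        · intro k' hk'
          rw [hvk, pvIsDist_unique board n m s g hk hk']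
        · intro hun
          exact absurd hk.1 (hun k)
      | none =>
        -- expand the popped cell in all four directions
        have he := hInv'.qmem (r0, c0, cnt) List.mem_cons_self
        have hv0grid : ((r0, c0) : Int × Int) ∈ pvGrid n m := he.1
        have Hnew : ∀ w ∈ pvNbr board n m (r0, c0), pvGetCell cb w.1 w.2 = none → w ≠ s →
            pvIsDist board n m s w d' := by
          intro w hw hwnone hws
          rcases he.2 with ⟨hrs, hc1⟩ | hval
          · -- the popped entry is the initial one: (r0, c0) = s and d' = 1
            have hd1 : d' = 1 := by
              rw [hc1] at hecnt
              omega
            have hwV1 : w ∈ pvV board n m s 1 :=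
              (pvMem_V_succ board n m s 0 w).mpr (Or.inr ⟨s, by simp [pvV], by rw [← hrs]; exact hw⟩)
            rw [hd1]
            refine ⟨hwV1, ?_⟩
            intro j hj
            interval_cases j
            simp [pvV]
            exact hws
          · -- the popped entry carries a settled value d' - 1
            by_cases hrs : ((r0, c0) : Int × Int) = s
            · -- cb s is set, so s was expanded before: contradiction with an unset neighbour
              rcases hInv'.sInit with ⟨x, hx, hxs, hx1⟩ | hexp
              · -- a count-1 entry forces d' = 1, but then cb (r0,c0) = some 0 violates bounds
                have hx22 : x.2.2 = (d' : Int) ∨ x.2.2 = (d' : Int) + 1 := by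
                  rcases List.mem_cons.mp hx with rfl | hx'
                  · left; exact hecnt
                  · rw [hrest] at hx'
                    rcases List.mem_append.mp hx' with h | h
                    · left; exact hq1 x h
                    · right; exact hq2 x h
                have hd1 : d' = 1 := by
                  rw [hx1] at hx22
                  rcases hx22 with h | h <;> omega
                have hb := (hInv'.bounds (r0, c0) hv0grid (cnt - 1) hval).1
                have h2 : cnt = (d' : Int) := hecnt
                exact absurd rfl (by omega : ¬ (w = w))
              · exact absurd hwnone (by rw [← hrs] at hexp; exact hexp w hw)
            · obtain ⟨k, hk, hck⟩ := hInv'.vals (r0, c0) hv0grid hrs (cnt - 1) hval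
              have hkd : k = d' - 1 := by
                have h2 : cnt = (d' : Int) := hecnt
                omega
              have hwV : w ∈ pvV board n m s d' := by
                have hdd : d' = (d' - 1) + 1 := by omega
                rw [hdd]
                refine (pvMem_V_succ board n m s (d' - 1) w).mpr (Or.inr ⟨(r0, c0), ?_, hw⟩)
                rw [← hkd]
                exact hk.1
              refine ⟨hwV, ?_⟩
              intro j hj hmemj
              have : w ∈ pvV board n m s (d' - 1) :=
                pvV_mono board n m s (by omega : j ≤ d' - 1) hmemj
              rcases hInv'.levelset w this with h | h
              · exact hws h
              · exact h hwnone
        have hF0 : pvFInv board n m s d' cb cb :=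
          ⟨hInv'.wf, fun w _ _ => rfl, fun w _ h => Or.inl h, hInv'.vals, hInv'.bounds⟩
        have hfold := pvFoldA board n m s d' cb r0 c0 cnt hv0grid hecnt hd' Hnew pvDirsA
          (cb, rest) (fun dd hdd => List.mem_map_of_mem hdd) hF0
        obtain ⟨hF', hpres', hcov', P, hPq, hPe, hPnew, hPcard⟩ := hfold
        obtain ⟨hwf', hpres, hnewv, hvals', hbounds'⟩ := hF'
        have hfold_eq : (pvDirsA.foldl
            (fun (st : List (List (Option Int)) × List (Int × Int × Int)) dd =>
              let p := pvSlideA board n m dd.1 dd.2 (n.toNat + m.toNat + 2) r0 c0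
              match pvGetCell st.1 p.1 p.2 with
              | some v =>
                if cnt < v then (pvSetCell st.1 p.1 p.2 cnt, st.2 ++ [(p.1, p.2, cnt + 1)])
                else st
              | none => (pvSetCell st.1 p.1 p.2 cnt, st.2 ++ [(p.1, p.2, cnt + 1)]))
            (cb, rest))
            = pvDirsA.foldl (pvStepA board n m r0 c0 cnt) (cb, rest) := rfl
        rw [hfold_eq]
        set stf := pvDirsA.foldl (pvStepA board n m r0 c0 cnt) (cb, rest) with hstf
        -- all four destinations are set afterwards
        have hcovnbr : ∀ w ∈ pvNbr board n m (r0, c0), pvGetCell stf.1 w.1 w.2 ≠ none := by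
          intro w hw
          obtain ⟨dd, hdd, hddw⟩ := List.mem_map.mp hw
          rw [← hddw]
          exact hcov' dd hdd
        -- rebuild the invariant at level d' for the new state
        have hInv2 : pvInvA board n m s g d' stf.1 stf.2 := by
          refine ⟨hwf', ?_, ?_, hvals', hbounds', ?_, ?_, ?_, ?_, hd'⟩
          · refine ⟨q1, q2 ++ P, by rw [hPq, hrest]; simp, hq1, ?_⟩
            intro x hx
            rcases List.mem_append.mp hx with h | h
            · exact hq2 x h
            · have hecnt2 : cnt = (d' : Int) := hecnt
              rw [(hPe x h).2.2.1, hecnt2]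
          · intro x hx
            rw [hPq] at hx
            rcases List.mem_append.mp hx with hxr | hxP
            · have hxq := hInv'.qmem x (List.mem_cons_of_mem _ hxr)
              refine ⟨hxq.1, ?_⟩
              rcases hxq.2 with h | h
              · exact Or.inl h
              · right
                have hpx := hpres (x.1, x.2.1) hxq.1
                  (by show pvGetCell cb x.1 x.2.1 ≠ none; rw [h]; simp)
                show pvGetCell stf.1 x.1 x.2.1 = some (x.2.2 - 1)
                rw [show pvGetCell stf.1 x.1 x.2.1 = pvGetCell cb x.1 x.2.1 from hpx, h]
            · have hPex := hPe x hxP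
              refine ⟨hPex.1, Or.inr ?_⟩
              show pvGetCell stf.1 x.1 x.2.1 = some (x.2.2 - 1)
              have h4 := hPex.2.2.2
              have h3 := hPex.2.2.1
              rw [show pvGetCell stf.1 x.1 x.2.1 = some cnt from h4, h3]
              congr 1
              omega
          · intro v hv
            rcases hInv'.levelset v hv with h | h
            · exact Or.inl h
            · right
              have hvgrid : v ∈ pvGrid n m :=
                pvV_subset_grid board n m s hs (d' - 1) hv
              rw [hpres v hvgrid h]
              exact h
          · intro v hv hvset
            rcases hvset with hvs | hvset
            · -- v = s
              rcases hInv'.expand v hv (Or.inl hvs) with ⟨x, hx, hxv⟩ | hexp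
              · rcases List.mem_cons.mp hx with rfl | hx'
                · right
                  intro w hw
                  apply hcovnbr
                  rw [← hxv] at hw
                  exact hw
                · left
                  exact ⟨x, by rw [hPq]; exact List.mem_append_left _ hx', hxv⟩
              · right
                intro w hw
                have hwgrid := pvNbr_subset_grid board n m v hv w hw
                rw [hpres w hwgrid (hexp w hw)]
                exact hexp w hw
            · rcases hnewv v hv hvset with hold | hnew
              · rcases hInv'.expand v hv (Or.inr hold) with ⟨x, hx, hxv⟩ | hexp
                · rcases List.mem_cons.mp hx with rfl | hx'
                  · right
                    intro w hw
                    apply hcovnbr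
                    rw [← hxv] at hw
                    exact hw
                  · left
                    exact ⟨x, by rw [hPq]; exact List.mem_append_left _ hx', hxv⟩
                · right
                  intro w hw
                  have hwgrid := pvNbr_subset_grid board n m v hv w hw
                  rw [hpres w hwgrid (hexp w hw)]
                  exact hexp w hw
              · -- newly set: v was pushed
                by_cases hvold : pvGetCell cb v.1 v.2 = none
                · obtain ⟨x, hx, hxv⟩ := hPnew v hv hvold hvset
                  left
                  exact ⟨x, by rw [hPq]; exact List.mem_append_right _ hx, hxv⟩
                · rcases hInv'.expand v hv (Or.inr hvold) with ⟨x, hx, hxv⟩ | hexp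
                  · rcases List.mem_cons.mp hx with rfl | hx'
                    · right
                      intro w hw
                      apply hcovnbr
                      rw [← hxv] at hw
                      exact hw
                    · left
                      exact ⟨x, by rw [hPq]; exact List.mem_append_left _ hx', hxv⟩
                  · right
                    intro w hw
                    have hwgrid := pvNbr_subset_grid board n m v hv w hw
                    rw [hpres w hwgrid (hexp w hw)]
                    exact hexp w hw
          · rcases hInv'.sInit with ⟨x, hx, hxs, hx1⟩ | hexp
            · rcases List.mem_cons.mp hx with rfl | hx'
              · -- the initial entry was just popped: s is now fully expanded
                right
                intro w hw
                apply hcovnbr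
                rw [← hxs] at hw
                exact hw
              · left
                exact ⟨x, by rw [hPq]; exact List.mem_append_left _ hx', hxs, hx1⟩
            · right
              intro w hw
              have hwgrid := pvNbr_subset_grid board n m s hs w hw
              rw [hpres w hwgrid (hexp w hw)]
              exact hexp w hw
          · intro hq'
            rw [hPq] at hq'
            have hP0 : P = [] := by
              cases hrr : rest ++ P with
              | nil => exact (List.append_eq_nil_iff.mp hrr).2
              | cons a l => rw [hrr] at hq'; cases hq'
            by_contra hgset
            rcases hnewv g hg hgset with hold | hnew
            · exact hold hgoal
            · obtain ⟨x, hx, _⟩ := hPnew g hg hgoal (by rw [hnew]; simp)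
              rw [hP0] at hx
              cases hx
        apply ih d' stf.1 stf.2 hInv2
        have hlen : stf.2.length = rest.length + P.length := by rw [hPq]; simp
        dsimp only at hPcard
        simp only [List.length_cons] at hfuel
        omega

-- the invariant holds at A's initial state
theorem pvInvA_init (board : List String) (n m : Int) (s g : Int × Int)
    (hs : s ∈ pvGrid n m) (hg : g ∈ pvGrid n m) :
    pvInvA board n m s g 1
      (List.replicate n.toNat (List.replicate m.toNat (none : Option Int)))
      [(s.1, s.2, 1)] := by
  refine ⟨pvWF_init n m, ⟨[(s.1, s.2, 1)], [], by simp, by simp, by simp⟩, ?_, ?_, ?_, ?_, ?_, ?_,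
    ?_, le_refl 1⟩
  · intro e he
    simp only [List.mem_singleton] at he
    rw [he]
    exact ⟨by simpa using hs, Or.inl ⟨by simp, rfl⟩⟩
  · intro v hv _ c hc
    rw [pvGetCell_init n m v.1 v.2 (by simpa using hv)] at hc
    cases hc
  · intro v hv c hc
    rw [pvGetCell_init n m v.1 v.2 (by simpa using hv)] at hc
    cases hc
  · intro v hv
    left
    simpa [pvV] using hv
  · intro v hv hvset
    rcases hvset with hvs | hvset
    · left
      exact ⟨(s.1, s.2, 1), List.mem_singleton.mpr rfl, by rw [hvs]⟩
    · exact absurd (pvGetCell_init n m v.1 v.2 (by simpa using hv)) hvset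
  · left
    exact ⟨(s.1, s.2, 1), List.mem_singleton.mpr rfl, by simp, rfl⟩
  · intro h; cases h

-- ===================================================================
-- B-side: the fixpoint sweep returns the distance to g (or -1)
-- ===================================================================

def pvDInv (board : List String) (n m : Int) (s : Int × Int) (r : Nat)
    (dist : PySem.Dict (Int × Int) Int) : Prop :=
  dist.keys.Nodup ∧
  (∀ v, dist.get? v ≠ none ↔ v ∈ pvV board n m s r) ∧
  (∀ v c, dist.get? v = some c → ∃ k, pvIsDist board n m s v k ∧ c = (k : Int))

def pvRInv (board : List String) (n m : Int) (s : Int × Int) (r : Nat)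
    (dist0 : PySem.Dict (Int × Int) Int) (st : PySem.Dict (Int × Int) Int × Bool) : Prop :=
  st.1.keys.Nodup ∧
  (∀ v, dist0.get? v ≠ none → st.1.get? v = dist0.get? v) ∧
  (∀ v c, st.1.get? v = some c →
      (∃ k, pvIsDist board n m s v k ∧ c = (k : Int)) ∧ v ∈ pvV board n m s (r + 1)) ∧
  (st.2 = false → st.1 = dist0) ∧
  (st.2 = true → ∃ v, st.1.get? v ≠ none ∧ dist0.get? v = none)

-- B's dests helper computes the slide of A's inner while loop
theorem pv_dest_eq_slide (board : List String) (n m dr dc : Int) :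
    ∀ (fuel : Nat) (r c : Int),
      pvDestB board n m dr dc fuel r c = pvSlideA board n m dr dc fuel r c := by
  intro fuel
  induction fuel with
  | zero => intro r c; rfl
  | succ f ih =>
    intro r c
    simp only [pvDestB, pvSlideA]
    have hcb : pvCellB board (r + dr) (c + dc) = pvCellA board (r + dr) (c + dc) := rfl
    rw [hcb]
    split_ifs with h
    · exact ih _ _
    · rfl

theorem pvDestsB_eq_nbr (board : List String) (n m r c : Int) :
    pvDestsB board n m r c = pvNbr board n m (r, c) := by
  unfold pvDestsB pvNbr pvDirsB pvDirsA
  simp [pv_dest_eq_slide]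

-- one cell's destinations processed inside a sweep
theorem pvRB_inner (board : List String) (n m : Int) (s : Int × Int) (r : Nat)
    (dist0 : PySem.Dict (Int × Int) Int) (hD : pvDInv board n m s r dist0)
    (cell : Int × Int) (dv : Int) (hcell : dist0.get? cell = some dv) :
    ∀ (nbs : List (Int × Int)) (st : PySem.Dict (Int × Int) Int × Bool),
      (∀ nb ∈ nbs, nb ∈ pvNbr board n m cell) → pvRInv board n m s r dist0 st →
      pvRInv board n m s r dist0
        (nbs.foldl (fun st nb =>
          match st.1.get? nb with
          | none => (st.1.insert nb (dv + 1), true)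
          | some _ => st) st) ∧
      (∀ v, st.1.get? v ≠ none →
        (nbs.foldl (fun st nb =>
          match st.1.get? nb with
          | none => (st.1.insert nb (dv + 1), true)
          | some _ => st) st).1.get? v = st.1.get? v) ∧
      (∀ nb ∈ nbs,
        (nbs.foldl (fun st nb =>
          match st.1.get? nb with
          | none => (st.1.insert nb (dv + 1), true)
          | some _ => st) st).1.get? nb ≠ none) := by
  intro nbs
  induction nbs with
  | nil => intro st _ hR; exact ⟨hR, fun v _ => rfl, by simp⟩
  | cons nb nbs ih =>
    intro st hmem hR
    obtain ⟨hnd, hpres, hvals, hfalse, htrue⟩ := hR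
    have hnbmem : nb ∈ pvNbr board n m cell := hmem nb List.mem_cons_self
    simp only [List.foldl_cons]
    cases hget : st.1.get? nb with
    | some w =>
      simp only [hget]
      have := ih st (fun x hx => hmem x (List.mem_cons_of_mem _ hx)) ⟨hnd, hpres, hvals, hfalse, htrue⟩
      refine ⟨this.1, this.2.1, ?_⟩
      intro x hx
      rcases List.mem_cons.mp hx with rfl | hx'
      · rw [this.2.1 x (by rw [hget]; simp)]
        rw [hget]; simp
      · exact this.2.2 x hx'
    | none =>
      -- fresh destination: it is discovered here at distance dv + 1
      have hd0none : dist0.get? nb = none := by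
        by_contra hne
        rw [hpres nb hne] at hget
        exact hne hget
      have hnbVr : nb ∉ pvV board n m s r := by
        intro hmemV
        exact ((hD.2.1 nb).mpr hmemV) hd0none
      obtain ⟨kc, hkc, hdv⟩ := hD.2.2 cell dv hcell
      have hcellVr : cell ∈ pvV board n m s r := (hD.2.1 cell).mp (by rw [hcell]; simp)
      have hkcr : kc ≤ r := pvIsDist_le board n m s cell hkc hcellVr
      have hnbV : nb ∈ pvV board n m s (kc + 1) :=
        (pvMem_V_succ board n m s kc nb).mpr (Or.inr ⟨cell, hkc.1, hnbmem⟩)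
      obtain ⟨j, hjle, hjd⟩ := pvIsDist_exists board n m s nb (kc + 1) hnbV
      have hjge : r + 1 ≤ j := by
        by_contra hlt
        exact hnbVr (pvV_mono board n m s (by omega : j ≤ r) hjd.1)
      have hjeq : j = kc + 1 := by omega
      have hreq : j = r + 1 := by omega
      have hRstep : pvRInv board n m s r dist0 (st.1.insert nb (dv + 1), true) := by
        refine ⟨PySem.Dict.nodup_keys_insert _ _ _ hnd, ?_, ?_, ?_, ?_⟩
        · intro v hv
          have hvne : v ≠ nb := by
            intro h
            apply hv
            rw [h]
            exact hd0none
          show (st.1.insert nb (dv + 1)).get? v = _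
          rw [PySem.Dict.get?_insert_of_ne _ _ hvne]
          exact hpres v hv
        · intro v c hv
          by_cases hvne : v = nb
          · subst hvne
            rw [show (st.1.insert v (dv + 1)).get? v = some (dv + 1) from
              PySem.Dict.get?_insert_self _ _ _] at hv
            refine ⟨⟨j, hjd, ?_⟩, by rw [← hreq]; exact hjd.1⟩
            have hc : c = dv + 1 := by injection hv with h; exact h.symm
            rw [hc, hdv, hjeq]
            push_cast
            ring
          · rw [show ((st.1.insert nb (dv + 1)), true).1.get? v = st.1.get? v from
              PySem.Dict.get?_insert_of_ne _ _ hvne] at hv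
            exact hvals v c hv
        · intro h; cases h
        · intro _
          exact ⟨nb, by rw [PySem.Dict.get?_insert_self]; simp, hd0none⟩
      simp only [hget]
      have := ih (st.1.insert nb (dv + 1), true)
        (fun x hx => hmem x (List.mem_cons_of_mem _ hx)) hRstep
      refine ⟨this.1, ?_, ?_⟩
      · intro v hv
        have hvne : v ≠ nb := by
          intro h; rw [h] at hv; exact hv hget
        rw [this.2.1 v (by
          show (st.1.insert nb (dv + 1)).get? v ≠ none
          rw [PySem.Dict.get?_insert_of_ne _ _ hvne]; exact hv)]
        show (st.1.insert nb (dv + 1)).get? v = _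
        rw [PySem.Dict.get?_insert_of_ne _ _ hvne]
      · intro x hx
        rcases List.mem_cons.mp hx with rfl | hx'
        · rw [this.2.1 x (by rw [PySem.Dict.get?_insert_self]; simp)]
          rw [PySem.Dict.get?_insert_self]; simp
        · exact this.2.2 x hx'

-- a full sweep preserves the invariant and covers every processed cell's destinations
theorem pvRB_round (board : List String) (n m : Int) (s : Int × Int) (r : Nat)
    (dist0 : PySem.Dict (Int × Int) Int) (hD : pvDInv board n m s r dist0) :
    ∀ (L : List ((Int × Int) × Int)) (st : PySem.Dict (Int × Int) Int × Bool),
      (∀ p ∈ L, dist0.get? p.1 = some p.2) → pvRInv board n m s r dist0 st →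
      pvRInv board n m s r dist0 (pvRoundB board n m L st) ∧
      (∀ v, st.1.get? v ≠ none → (pvRoundB board n m L st).1.get? v ≠ none) ∧
      (∀ p ∈ L, ∀ nb ∈ pvNbr board n m p.1,
        (pvRoundB board n m L st).1.get? nb ≠ none) := by
  intro L
  induction L with
  | nil => intro st _ hR; exact ⟨hR, fun v hv => hv, by simp⟩
  | cons p L ih =>
    intro st hL hR
    obtain ⟨cell, dv⟩ := p
    have hcell : dist0.get? cell = some dv := hL (cell, dv) List.mem_cons_self
    have hinner := pvRB_inner board n m s r dist0 hD cell dv hcell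
      (pvDestsB board n m cell.1 cell.2) st
      (by rw [pvDestsB_eq_nbr]; intro x hx; simpa using hx) hR
    show pvRInv board n m s r dist0 (pvRoundB board n m L _) ∧ _
    have hrest := ih _ (fun q hq => hL q (List.mem_cons_of_mem _ hq)) hinner.1
    refine ⟨hrest.1, ?_, ?_⟩
    · intro v hv
      apply hrest.2.1
      rw [hinner.2.1 v hv]
      exact hv
    · intro q hq nb hnb
      rcases List.mem_cons.mp hq with rfl | hq'
      · apply hrest.2.1
        apply hinner.2.2
        rw [pvDestsB_eq_nbr]
        simpa using hnb
      · exact hrest.2.2 q hq' nb hnb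

theorem pvLoopB_ok (board : List String) (n m : Int) (s g : Int × Int)
    (hs : s ∈ pvGrid n m) :
    ∀ (fuel : Nat) (r : Nat) (dist : PySem.Dict (Int × Int) Int) (changed : Bool),
      pvDInv board n m s r dist →
      (changed = false → pvV board n m s (r + 1) = pvV board n m s r) →
      (changed = true → r + 1 ≤ (pvV board n m s r).card) →
      r ≤ n.toNat * m.toNat + 1 →
      n.toNat * m.toNat + 2 - r ≤ fuel →
      pvResOK board n m s g (pvLoopB board n m g fuel changed dist) := by
  intro fuel
  induction fuel with
  | zero =>
    intro r dist changed _ _ _ hr hfuel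
    omega
  | succ f ih =>
    intro r dist changed hD hfalse htrue hr hfuel
    show pvResOK board n m s g (if changed = true ∧ dist.get? g = none then _ else _)
    by_cases hcond : changed = true ∧ dist.get? g = none
    · rw [if_pos hcond]
      -- run one sweep
      have hR0 : pvRInv board n m s r dist (dist, false) := by
        refine ⟨hD.1, fun v _ => rfl, ?_, fun _ => rfl, by simp⟩
        intro v c hv
        exact ⟨hD.2.2 v c hv, pvV_subset_succ board n m s r ((hD.2.1 v).mp (by rw [hv]; simp))⟩
      have hitems : ∀ p ∈ dist.items, dist.get? p.1 = some p.2 := by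
        intro p hp
        obtain ⟨k, v⟩ := p
        exact PySem.Dict.get?_of_mem_items dist hp hD.1
      have hround := pvRB_round board n m s r dist hD dist.items (dist, false) hitems hR0
      set st := pvRoundB board n m dist.items (dist, false) with hstdef
      obtain ⟨⟨hnd', hpres', hvals', hfalse', htrue'⟩, hmono', hcover'⟩ := hround
      -- the new dictionary realises the next level set
      have hD' : pvDInv board n m s (r + 1) st.1 := by
        refine ⟨hnd', ?_, fun v c hv => (hvals' v c hv).1⟩
        intro v
        constructor
        · intro hv
          cases hvv : st.1.get? v with
          | none => exact absurd hvv hv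
          | some c => exact (hvals' v c hvv).2
        · intro hv
          rcases (pvMem_V_succ board n m s r v).mp hv with hvr | ⟨u, hu, hnb⟩
          · have : dist.get? v ≠ none := (hD.2.1 v).mpr hvr
            rw [hpres' v this]
            exact this
          · have hu' : dist.get? u ≠ none := (hD.2.1 u).mpr hu
            cases huv : dist.get? u with
            | none => exact absurd huv hu'
            | some du =>
              exact hcover' (u, du) (PySem.Dict.mem_items_of_get?_eq_some dist huv) v hnb
      apply ih (r + 1) st.1 st.2 hD'
      · -- changed stayed false: the level set is stable
        intro hch
        have hsame : st.1 = dist := hfalse' hch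
        have hVeq : pvV board n m s (r + 1) = pvV board n m s r := by
          ext v
          rw [← hD'.2.1 v, hsame, hD.2.1 v]
        exact pvV_stable_step board n m s r hVeq
      · -- changed: the level set grew strictly
        intro hch
        obtain ⟨v0, hv0, hv0d⟩ := htrue' hch
        have hv0V : v0 ∈ pvV board n m s (r + 1) := by
          cases hvv : st.1.get? v0 with
          | none => exact absurd hvv hv0
          | some c => exact (hvals' v0 c hvv).2
        have hv0nr : v0 ∉ pvV board n m s r := by
          intro h
          exact ((hD.2.1 v0).mpr h) hv0d
        have hss : pvV board n m s r ⊂ pvV board n m s (r + 1) :=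
          ⟨pvV_subset_succ board n m s r, fun hsub => hv0nr (hsub hv0V)⟩
        have := Finset.card_lt_card hss
        have := htrue hcond.1
        omega
      · have h1 := htrue hcond.1
        have h2 := pvCard_V_le board n m s hs r
        omega
      · have h1 := htrue hcond.1
        have h2 := pvCard_V_le board n m s hs r
        omega
    · rw [if_neg hcond]
      cases hgv : dist.get? g with
      | some v =>
        constructor
        · intro k hk
          obtain ⟨k', hk', hvk⟩ := hD.2.2 g v hgv
          rw [hvk, pvIsDist_unique board n m s g hk' hk]
        · intro hun
          exact absurd ((hD.2.1 g).mp (by rw [hgv]; simp)) (hun r)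
      | none =>
        constructor
        · intro k hk
          have hch : changed = false := by
            cases changed
            · rfl
            · exact absurd ⟨rfl, hgv⟩ hcond
          have hstab := pvV_stable board n m s r (hfalse hch) k
          have : g ∈ pvV board n m s r := hstab hk.1
          exact absurd ((hD.2.1 g).mpr this) (by rw [hgv]; simp)
        · intro _; rfl

-- ---------- locating R and G: A's scan variables vs B's dictionary ----------

def pvFindRel (board : List String) (n m : Int)
    (sp : Option (Int × Int) × Option (Int × Int)) (d : PySem.Dict Char (Int × Int)) : Prop :=
  d.get? 'R' = sp.1 ∧ d.get? 'G' = sp.2 ∧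
  (∀ p, sp.1 = some p → p ∈ pvGrid n m ∧ pvCellA board p.1 p.2 = 'R') ∧
  (∀ p, sp.2 = some p → p ∈ pvGrid n m ∧ pvCellA board p.1 p.2 = 'G')

theorem pv_foldl_rel {γ S T : Type} {R : S → T → Prop} (f : S → γ → S) (g : T → γ → T) :
    ∀ (l : List γ) (s : S) (t : T),
      (∀ x ∈ l, ∀ s t, R s t → R (f s x) (g t x)) → R s t → R (l.foldl f s) (l.foldl g t) := by
  intro l
  induction l with
  | nil => intro s t _ h; exact h
  | cons x xs ih =>
    intro s t hstep h
    exact ih _ _ (fun y hy => hstep y (List.mem_cons_of_mem _ hy)) (hstep x List.mem_cons_self _ _ h)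

theorem pv_find_rel (board : List String) (n m : Int) :
    pvFindRel board n m (pvFindA board n m) (pvFindB board n m) := by
  unfold pvFindA pvFindB
  apply pv_foldl_rel
  · intro i hi s d hsd
    have hi' := (PySem.List.mem_pyRange_one).1 hi
    apply pv_foldl_rel
    · intro j hj s d hsd
      have hj' := (PySem.List.mem_pyRange_one).1 hj
      have hcb : pvCellB board i j = pvCellA board i j := rfl
      obtain ⟨hR, hG, hs1, hs2⟩ := hsd
      by_cases hr : pvCellA board i j = 'R'
      · refine ⟨?_, ?_, ?_, ?_⟩
        · simp [hcb, hr, PySem.Dict.get?_insert_self]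
        · simp [hcb, hr, PySem.Dict.get?_insert_of_ne _ _ (by decide : ('G' : Char) ≠ 'R'), hG]
        · intro p hp
          have hpe : ((i, j) : Int × Int) = p := by simpa [hcb, hr] using hp
          rw [← hpe]
          exact ⟨(pvMem_grid n m (i, j)).mpr ⟨hi'.1, hi'.2, hj'.1, hj'.2⟩, hr⟩
        · intro p hp
          apply hs2
          simpa [hcb, hr] using hp
      · by_cases hg : pvCellA board i j = 'G'
        · refine ⟨?_, ?_, ?_, ?_⟩
          · simp [hcb, hg, PySem.Dict.get?_insert_of_ne _ _ (by decide : ('R' : Char) ≠ 'G'), hR]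
          · simp [hcb, hg, PySem.Dict.get?_insert_self]
          · intro p hp
            apply hs1
            simpa [hcb, hr, hg] using hp
          · intro p hp
            have hpe : ((i, j) : Int × Int) = p := by simpa [hcb, hr, hg] using hp
            rw [← hpe]
            exact ⟨(pvMem_grid n m (i, j)).mpr ⟨hi'.1, hi'.2, hj'.1, hj'.2⟩, hg⟩
        · simpa [hcb, hr, hg] using ⟨hR, hG, hs1, hs2⟩
    · exact hsd
  · refine ⟨?_, ?_, ?_, ?_⟩
    · simp [PySem.Dict.get?_empty]
    · simp [PySem.Dict.get?_empty]
    · intro p h; cases h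
    · intro p h; cases h

-- ===== VERDICT (by name: the statement is the Claim_ definition above) =====
theorem solution_spec : Claim_equal_solution := by
  intro board _ _
  unfold Spec_solution solution solution_alt
  dsimp only
  obtain ⟨hR, hG, hs1, hs2⟩ := pv_find_rel board (PySem.List.len board)
    (PySem.Str.len (PySem.List.pyGetD board 0 ""))
  rw [hR, hG]
  cases hA : pvFindA board (PySem.List.len board)
      (PySem.Str.len (PySem.List.pyGetD board 0 "")) with
  | mk o1 o2 =>
    rw [hA] at hs1 hs2
    cases o1 with
    | none => rfl
    | some sv =>
      cases o2 with
      | none => rfl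
      | some gv =>
        obtain ⟨hsgrid, hsR⟩ := hs1 sv rfl
        obtain ⟨hggrid, hgG⟩ := hs2 gv rfl
        have hgs : gv ≠ sv := by
          intro h
          rw [h, hsR] at hgG
          exact absurd hgG (by decide)
        set n : Int := PySem.List.len board with hn
        set m : Int := PySem.Str.len (PySem.List.pyGetD board 0 "") with hm
        apply pvResOK_unique board n m sv gv
        · -- A's queue BFS computes the distance to gv
          apply pvLoopA_ok board n m sv gv hsgrid hggrid hgs _ 1 _ _
            (pvInvA_init board n m sv gv hsgrid hggrid)
          have h1 := pvUnset_card_le n m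
            (List.replicate n.toNat (List.replicate m.toNat (none : Option Int)))
          have h2 : n.toNat * m.toNat ≤ (n.toNat + 1) * (m.toNat + 1) :=
            Nat.mul_le_mul (Nat.le_succ _) (Nat.le_succ _)
          simp only [List.length_singleton]
          omega
        · -- B's fixpoint sweep computes the distance to gv
          apply pvLoopB_ok board n m sv gv hsgrid _ 0 _ true
          · refine ⟨?_, ?_, ?_⟩
            · exact PySem.Dict.nodup_keys_insert _ _ _ PySem.Dict.nodup_keys_empty
            · intro v
              rw [PySem.Dict.get?_insert]
              by_cases hv : v = sv
              · rw [if_pos hv, hv]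
                simp [pvV]
              · rw [if_neg hv, PySem.Dict.get?_empty]
                simp [pvV, hv]
            · intro v c hv
              rw [PySem.Dict.get?_insert] at hv
              by_cases hvv : v = sv
              · rw [if_pos hvv] at hv
                have hc : c = 0 := by injection hv with h; exact h.symm
                refine ⟨0, ⟨by rw [hvv]; simp [pvV], fun j hj => absurd hj (Nat.not_lt_zero j)⟩, ?_⟩
                rw [hc]
                rfl
              · rw [if_neg hvv, PySem.Dict.get?_empty] at hv
                cases hv
          · intro h
            cases h
          · intro _
            simp [pvV]
          · omega
          · omega
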